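-- pv_equiv track=rewrite | github.com/SomnathB-codes/Legal_Scanner | extract_case_metadata.py | detect_court_level
-- ===== SOURCE A (Python) =====
-- def detect_court_level(court_name: str) -> str:
--     name = court_name.lower()
--     if "high court" in name:
--         return "High Court"
--     if any(k in name for k in ["sessions", "district"]):
--         return "Sessions"
--     if any(k in name for k in ["magistrate", "judicial", "jmfc", "acjm", "cjm"]):
--         return "Magistrate"
--     return "Unknown"
-- ===== SOURCE B (Python) =====
-- _KEYWORDS = [("high court", 0), ("sessions", 1), ("district", 1),
--              ("magistrate", 2), ("judicial", 2), ("jmfc", 2), ("acjm", 2), ("cjm", 2)]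
-- _LABELS = ["High Court", "Sessions", "Magistrate", "Unknown"]
--
-- def detect_court_level(court_name: str) -> str:
--     # One left-to-right scan over the lowered name: at every position keep the
--     # minimum rank of any keyword starting there; the label is the best rank found.
--     name = court_name.lower()
--     best = 3
--     for i in range(len(name)):
--         for kw, rank in _KEYWORDS:
--             if rank < best and name.startswith(kw, i):
--                 best = rank
--     return _LABELS[best]
-- ===== Notes on version B (the rewrite author's own statement) =====
-- stated objective: alternative
-- what changed: Replaced A's ordered chain of whole-string substring-membership tests by a single left-to-right positional scan that keeps the minimum rank of any keyword starting at each position and indexes a label table with the best rank found.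
import Mathlib
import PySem

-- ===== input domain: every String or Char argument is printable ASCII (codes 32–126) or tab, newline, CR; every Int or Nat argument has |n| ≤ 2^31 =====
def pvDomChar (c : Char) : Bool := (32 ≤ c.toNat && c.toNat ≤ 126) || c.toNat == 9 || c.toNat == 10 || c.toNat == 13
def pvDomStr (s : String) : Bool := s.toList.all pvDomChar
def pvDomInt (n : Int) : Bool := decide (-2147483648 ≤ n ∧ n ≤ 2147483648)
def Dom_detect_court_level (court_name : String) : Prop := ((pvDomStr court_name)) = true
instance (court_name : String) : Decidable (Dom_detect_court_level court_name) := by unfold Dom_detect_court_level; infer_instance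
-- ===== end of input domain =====

-- B replaces A's ordered substring-membership chain by a single positional scan that keeps the minimum matched rule rank and indexes a label table (alternative; same cost).


-- ===== PORT A =====
def detect_court_level (court_name : String) : String :=
  let name := PySem.Str.lower court_name
  if PySem.Str.isIn "high court" name then "High Court"
  else if ["sessions", "district"].any (fun k => PySem.Str.isIn k name) then "Sessions"
  else if ["magistrate", "judicial", "jmfc", "acjm", "cjm"].any (fun k => PySem.Str.isIn k name) then "Magistrate"
  else "Unknown"

-- ===== PORT B =====
-- _KEYWORDS from Source B, as char lists with their ranks
def pvKeywords : List (List Char × Nat) :=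
  [("high court".toList, 0), ("sessions".toList, 1), ("district".toList, 1),
   ("magistrate".toList, 2), ("judicial".toList, 2), ("jmfc".toList, 2),
   ("acjm".toList, 2), ("cjm".toList, 2)]

-- _LABELS from Source B
def pvLabels : List String := ["High Court", "Sessions", "Magistrate", "Unknown"]

-- the inner 'for kw, rank in _KEYWORDS: if rank < best and name.startswith(kw, i): best = rank'
-- Python's name.startswith(kw, i) is ported exactly as startswith on the suffix name[i:] (i ≥ 0 here).
def pvRankAt (suffix : List Char) (best : Nat) : Nat :=
  pvKeywords.foldl (fun b kr => if kr.2 < b && PySem.Chars.startswith suffix kr.1 then kr.2 else b) best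

-- the outer 'for i in range(len(name))' loop, as structural recursion over the suffixes of name
def pvScan : List Char → Nat → Nat
  | [], best => best
  | c :: rest, best => pvScan rest (pvRankAt (c :: rest) best)

def detect_court_level_alt (court_name : String) : String :=
  let name := (PySem.Str.lower court_name).toList
  -- _LABELS[best]: exact, since the scan result never exceeds its initial value 3
  pvLabels.getD (pvScan name 3) ""

-- ===== PRECONDITION & SPEC =====
def Spec_detect_court_level (court_name : String) (out : String) : Prop := out = detect_court_level_alt court_name
instance (court_name : String) (out : String) : Decidable (Spec_detect_court_level court_name out) := by unfold Spec_detect_court_level; infer_instance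

-- ===== CLAIM =====
def Claim_equal_detect_court_level : Prop := ∀ (court_name : String), Dom_detect_court_level court_name → Spec_detect_court_level court_name (detect_court_level court_name)

-- ===== LEMMAS AND PROOFS =====

-- minimum rank of a keyword occurring anywhere in s (the value the scan computes)
def pvM (s : List Char) : Nat :=
  if PySem.Chars.isIn "high court".toList s then 0
  else if PySem.Chars.isIn "sessions".toList s || PySem.Chars.isIn "district".toList s then 1
  else if PySem.Chars.isIn "magistrate".toList s || PySem.Chars.isIn "judicial".toList s ||
          PySem.Chars.isIn "jmfc".toList s || PySem.Chars.isIn "acjm".toList s ||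
          PySem.Chars.isIn "cjm".toList s then 2
  else 3

-- minimum rank of a keyword starting at the head of s
def pvR (s : List Char) : Nat :=
  if PySem.Chars.startswith s "high court".toList then 0
  else if PySem.Chars.startswith s "sessions".toList || PySem.Chars.startswith s "district".toList then 1
  else if PySem.Chars.startswith s "magistrate".toList || PySem.Chars.startswith s "judicial".toList ||
          PySem.Chars.startswith s "jmfc".toList || PySem.Chars.startswith s "acjm".toList ||
          PySem.Chars.startswith s "cjm".toList then 2
  else 3

lemma pvStep (b r : Nat) (sw : Bool) :
    (if r < b && sw then r else b) = if sw then min b r else b := by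
  cases sw <;> simp <;> split_ifs <;> omega

set_option maxHeartbeats 2000000 in
lemma pvRankAt_eq (s : List Char) (b : Nat) (hb : b ≤ 3) : pvRankAt s b = min b (pvR s) := by
  unfold pvRankAt pvKeywords pvR
  simp only [List.foldl_cons, List.foldl_nil, pvStep]
  split_ifs <;> simp_all

lemma pvIsIn_cons (kw : List Char) (c : Char) (rest : List Char) :
    PySem.Chars.isIn kw (c :: rest) = (PySem.Chars.startswith (c :: rest) kw || PySem.Chars.isIn kw rest) := by
  rw [Bool.eq_iff_iff]
  simp only [Bool.or_eq_true, PySem.Chars.isIn_iff_infix, PySem.Chars.startswith_iff]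
  exact List.infix_cons_iff

set_option maxHeartbeats 2000000 in
lemma pvM_cons (c : Char) (rest : List Char) : pvM (c :: rest) = min (pvR (c :: rest)) (pvM rest) := by
  unfold pvM pvR
  simp only [pvIsIn_cons, Bool.or_eq_true]
  generalize PySem.Chars.startswith (c :: rest) "high court".toList = b0
  generalize PySem.Chars.startswith (c :: rest) "sessions".toList = b1
  generalize PySem.Chars.startswith (c :: rest) "district".toList = b2
  generalize PySem.Chars.startswith (c :: rest) "magistrate".toList = b3
  generalize PySem.Chars.startswith (c :: rest) "judicial".toList = b4
  generalize PySem.Chars.startswith (c :: rest) "jmfc".toList = b5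
  generalize PySem.Chars.startswith (c :: rest) "acjm".toList = b6
  generalize PySem.Chars.startswith (c :: rest) "cjm".toList = b7
  generalize PySem.Chars.isIn "high court".toList rest = a0
  generalize PySem.Chars.isIn "sessions".toList rest = a1
  generalize PySem.Chars.isIn "district".toList rest = a2
  generalize PySem.Chars.isIn "magistrate".toList rest = a3
  generalize PySem.Chars.isIn "judicial".toList rest = a4
  generalize PySem.Chars.isIn "jmfc".toList rest = a5
  generalize PySem.Chars.isIn "acjm".toList rest = a6
  generalize PySem.Chars.isIn "cjm".toList rest = a7
  split_ifs <;> simp_all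

lemma pvM_nil : pvM [] = 3 := by decide

lemma pvScan_eq (s : List Char) : ∀ b, b ≤ 3 → pvScan s b = min b (pvM s) := by
  induction s with
  | nil => intro b hb; simp only [pvScan, pvM_nil]; omega
  | cons c rest ih =>
      intro b hb
      rw [pvScan, pvRankAt_eq _ _ hb, ih _ (by omega), pvM_cons]
      omega

lemma pvM_le (s : List Char) : pvM s ≤ 3 := by
  unfold pvM; split_ifs <;> omega

-- ===== VERDICT =====
theorem detect_court_level_spec : Claim_equal_detect_court_level := by
  intro s _
  unfold Spec_detect_court_level detect_court_level detect_court_level_alt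
  simp only [List.any_cons, List.any_nil, Bool.or_false, PySem.Str.isIn_eq, Bool.or_eq_true]
  rw [pvScan_eq _ 3 (by omega), Nat.min_eq_right (pvM_le _)]
  unfold pvM
  split_ifs <;> simp_all [pvLabels]
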